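-- pv_equiv track=rewrite | github.com/JBalloonist/advent-code | day2/password.py | check_policy_pt2
-- ===== SOURCE A (Python) =====
-- def get_policy(policy_list):
--     """
--     returns the min and max value for the letter in the password
--     >>> get_policy('1-3')
--     [1, 3]
--     """
--     return [int(i) for i in policy_list.split('-')]
--
-- def check_policy_pt2(policy_pw):
--     """
--     This checks if the password policy is being followed
--     >>> check_policy_pt2(['1-3', 'a', 'abcde'])
--     True
--     >>> check_policy_pt2(['1-3', 'b', 'cdefg'])
--     False
--     >>> check_policy_pt2(['2-9', 'c', 'ccccccccc'])
--     False
--     """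
--     policy = get_policy(policy_pw[0])
--     value = policy_pw[1]
--     pos_count = [1 for n, i in enumerate(policy_pw[2], start=1)
--                  if i == value and n in policy]
--
--     if sum(pos_count) == 1:
--         return True
--     else:
--         return False
-- ===== SOURCE B (Python) =====
-- def check_policy_pt2(policy_pw):
--     policy = [int(i) for i in policy_pw[0].split('-')]
--     value = policy_pw[1]
--     pw = policy_pw[2]
--     count = 0
--     for p in set(policy):
--         if 1 <= p <= len(pw) and pw[p - 1] == value:
--             count += 1
--     return count == 1
--
--
-- def get_policy(policy_list):
--     return [int(i) for i in policy_list.split('-')]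
-- ===== Notes on version B (the rewrite author's own statement) =====
-- stated objective: simpler
-- what changed: Instead of scanning every character of the password and testing each 1-based position for membership in the policy list, B looks up only the distinct policy positions directly in the password (with a range guard) and counts the matches.
import Mathlib
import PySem

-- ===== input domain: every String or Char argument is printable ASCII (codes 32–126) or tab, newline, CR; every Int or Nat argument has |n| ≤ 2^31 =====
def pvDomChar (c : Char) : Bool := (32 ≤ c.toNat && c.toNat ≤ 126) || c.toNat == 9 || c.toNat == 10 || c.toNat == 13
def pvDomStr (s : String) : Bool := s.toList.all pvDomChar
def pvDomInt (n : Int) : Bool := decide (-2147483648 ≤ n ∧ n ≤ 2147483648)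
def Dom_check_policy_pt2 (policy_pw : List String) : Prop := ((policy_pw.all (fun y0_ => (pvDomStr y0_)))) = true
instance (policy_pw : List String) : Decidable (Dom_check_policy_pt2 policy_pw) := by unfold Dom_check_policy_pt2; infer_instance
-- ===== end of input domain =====

-- B replaces A's scan over every password character (membership test into the
-- policy list for each position) by a direct indexed lookup of just the distinct
-- policy positions; objective: simpler.

-- ===== PORT A =====
-- int(i) raising ValueError is `ofStr? = none`; those inputs are excluded by Pre_,
-- the `.getD` defaults are never reached inside Pre_.
def get_policy (policy_list : String) : List Int :=
  ((PySem.Str.split? policy_list "-").getD []).map (fun i => (PySem.Int.ofStr? i).getD 0)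

def check_policy_pt2 (policy_pw : List String) : Bool :=
  let policy := get_policy (PySem.List.pyGetD policy_pw 0 "")
  let value := PySem.List.pyGetD policy_pw 1 ""
  let pos_count :=
    ((PySem.List.enumerate (PySem.List.pyGetD policy_pw 2 "").toList 1).filter
      (fun ni => String.ofList [ni.2] == value && decide (ni.1 ∈ policy))).map (fun _ => (1 : Int))
  if pos_count.sum = 1 then true else false

-- ===== PORT B =====
def check_policy_pt2_alt (policy_pw : List String) : Bool :=
  let policy := ((PySem.Str.split? (PySem.List.pyGetD policy_pw 0 "") "-").getD []).map
      (fun i => (PySem.Int.ofStr? i).getD 0)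
  let value := PySem.List.pyGetD policy_pw 1 ""
  let pw := (PySem.List.pyGetD policy_pw 2 "").toList
  let count := (PySem.Set.ofList policy).foldl
      (fun acc p =>
        if 1 ≤ p ∧ p ≤ (pw.length : Int) ∧ String.ofList [PySem.List.pyGetD pw (p - 1) ' '] = value
        then acc + 1 else acc) (0 : Int)
  decide (count = 1)

-- ===== PRECONDITION & SPEC =====
-- Pre_ excludes exactly the inputs where Python A raises: fewer than 3 elements
-- (IndexError) or a piece of policy_pw[0].split('-') that int() rejects (ValueError).
def Pre_check_policy_pt2 (policy_pw : List String) : Prop :=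
  3 ≤ policy_pw.length ∧
  ∀ t ∈ (PySem.Str.split? (policy_pw.getD 0 "") "-").getD [], PySem.Int.ofStr? t ≠ none

instance (policy_pw : List String) : Decidable (Pre_check_policy_pt2 policy_pw) := by
  unfold Pre_check_policy_pt2; infer_instance

def pvWitness_check_policy_pt2 : List String := ["1-3", "a", "abcde"]

def Spec_check_policy_pt2 (policy_pw : List String) (out : Bool) : Prop := out = check_policy_pt2_alt policy_pw
instance (policy_pw : List String) (out : Bool) : Decidable (Spec_check_policy_pt2 policy_pw out) := by unfold Spec_check_policy_pt2; infer_instance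

-- ===== CLAIM (what is proved, stated in full; the proofs are below) =====
def Claim_equal_check_policy_pt2 : Prop := ∀ (policy_pw : List String), Dom_check_policy_pt2 policy_pw → Pre_check_policy_pt2 policy_pw → Spec_check_policy_pt2 policy_pw (check_policy_pt2 policy_pw)

-- ===== LEMMAS AND PROOFS =====

-- The counted position sets coincide: positions n of the password whose character
-- matches and which lie in the policy list, versus distinct policy entries that
-- are in range and whose password character matches.
lemma pv_count_eq (policy : List Int) (value : String) (pw : List Char) :
    ((PySem.List.enumerate pw 1).filter
      (fun ni => String.ofList [ni.2] == value && decide (ni.1 ∈ policy))).length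
    = (PySem.Set.ofList policy).countP
        (fun p => decide (1 ≤ p ∧ p ≤ (pw.length : Int) ∧
                          String.ofList [PySem.List.pyGetD pw (p - 1) ' '] = value)) := by
  rw [← PySem.List.dedup_eq_ofList, List.countP_eq_length_filter]
  have hmap : (((PySem.List.enumerate pw 1).filter
      (fun ni => String.ofList [ni.2] == value && decide (ni.1 ∈ policy))).map Prod.fst).length
      = ((PySem.List.enumerate pw 1).filter
      (fun ni => String.ofList [ni.2] == value && decide (ni.1 ∈ policy))).length :=
    List.length_map _
  rw [← hmap]
  apply List.Perm.length_eq
  have hndA : (((PySem.List.enumerate pw 1).filter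
      (fun ni => String.ofList [ni.2] == value && decide (ni.1 ∈ policy))).map Prod.fst).Nodup := by
    have hpw : (((PySem.List.enumerate pw 1).filter
        (fun ni => String.ofList [ni.2] == value && decide (ni.1 ∈ policy)))).Pairwise
        (fun p q => p.1 < q.1) :=
      List.Pairwise.sublist List.filter_sublist (PySem.List.pairwise_lt_enumerate pw 1)
    exact (List.pairwise_map).mpr (hpw.imp (fun h => ne_of_lt h))
  have hndB : ((PySem.List.dedup policy).filter
      (fun p => decide (1 ≤ p ∧ p ≤ (pw.length : Int) ∧
                        String.ofList [PySem.List.pyGetD pw (p - 1) ' '] = value))).Nodup :=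
    (PySem.List.nodup_dedup policy).filter _
  rw [List.perm_ext_iff_of_nodup hndA hndB]
  intro x
  constructor
  · intro hx
    rcases List.mem_map.mp hx with ⟨ni, hni, hfst⟩
    rcases List.mem_filter.mp hni with ⟨hmem, hcond⟩
    rcases (PySem.List.mem_enumerate_iff pw 1 ni).mp hmem with ⟨k, hk, rfl⟩
    simp only [Bool.and_eq_true, beq_iff_eq, decide_eq_true_eq] at hcond
    subst hfst
    apply List.mem_filter.mpr
    refine ⟨(PySem.List.mem_dedup policy _).mpr hcond.2, ?_⟩
    have h1 : ((1 : Int) + k) - 1 = (k : Int) := by omega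
    refine decide_eq_true ⟨by omega, by push_cast; omega, ?_⟩
    rw [h1, PySem.List.pyGetD_eq_getElem pw ' ' (by positivity) (by omega)]
    simpa using hcond.1
  · intro hx
    rcases List.mem_filter.mp hx with ⟨hmem, hcond⟩
    rw [decide_eq_true_eq] at hcond
    obtain ⟨h1, h2, h3⟩ := hcond
    have hxpol : x ∈ policy := (PySem.List.mem_dedup policy x).mp hmem
    have hk : (x - 1).toNat < pw.length := by omega
    apply List.mem_map.mpr
    refine ⟨((1 : Int) + (x - 1).toNat, pw[(x - 1).toNat]), ?_, by omega⟩
    apply List.mem_filter.mpr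
    refine ⟨(PySem.List.mem_enumerate_iff pw 1 _).mpr ⟨(x - 1).toNat, hk, rfl⟩, ?_⟩
    simp only [Bool.and_eq_true, beq_iff_eq, decide_eq_true_eq]
    constructor
    · rw [PySem.List.pyGetD_eq_getElem pw ' ' (by omega) (by omega)] at h3
      exact h3
    · have : (1 : Int) + (x - 1).toNat = x := by omega
      rw [this]; exact hxpol

-- ===== VERDICT (by name: the statement is the Claim_ definition above) =====
theorem check_policy_pt2_spec : Claim_equal_check_policy_pt2 := by
  intro policy_pw _ _
  unfold Spec_check_policy_pt2 check_policy_pt2 check_policy_pt2_alt get_policy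
  simp only [PySem.List.foldl_ite_add_one, PySem.List.sum_map_const_int, pv_count_eq]
  simp
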